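-- pv_equiv track=rewrite | github.com/wyk18703232953/myResearch | codeComplex/data/filteredData/python/constant/python_constant_0169.py | iq_test
-- ===== SOURCE A (Python) =====
-- def iq_test(nums):
--     even = 0
--     odd = 0
--     pos_even = 0
--     pos_odd = 0
--     for i, v in enumerate(nums):
--         if v % 2 == 0:
--             even += 1
--             pos_even = i + 1
--         else:
--             odd += 1
--             pos_odd = i + 1
--     return pos_even if even == 1 else pos_odd
-- ===== SOURCE B (Python) =====
-- def iq_test(nums):
--     n_even = sum(1 for v in nums if v % 2 == 0)
--     if n_even == 1:
--         for i, v in enumerate(nums):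
--             if v % 2 == 0:
--                 return i + 1
--     else:
--         for i in range(len(nums) - 1, -1, -1):
--             if nums[i] % 2 != 0:
--                 return i + 1
--     return 0
-- ===== Notes on version B (the rewrite author's own statement) =====
-- stated objective: alternative
-- what changed: Instead of A's single forward pass maintaining four accumulators (both parity counts and both last positions), B counts evens once and then runs a targeted early-exit search: a forward scan for the unique even, or a backward scan from the end for the last odd.
import Mathlib
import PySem

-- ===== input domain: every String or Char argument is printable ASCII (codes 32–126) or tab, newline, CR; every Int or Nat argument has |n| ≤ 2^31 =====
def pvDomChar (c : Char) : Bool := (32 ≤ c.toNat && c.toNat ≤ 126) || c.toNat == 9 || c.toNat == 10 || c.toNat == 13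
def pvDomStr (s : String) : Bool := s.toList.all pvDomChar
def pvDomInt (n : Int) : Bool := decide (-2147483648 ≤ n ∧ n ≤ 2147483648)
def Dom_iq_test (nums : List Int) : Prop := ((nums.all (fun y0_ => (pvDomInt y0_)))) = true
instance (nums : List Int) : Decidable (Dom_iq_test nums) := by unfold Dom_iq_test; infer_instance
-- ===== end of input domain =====

-- ===== PORT A =====
-- A: one forward pass keeping parity counts and last positions of each parity.
def iqLoopA : List Int → Int → Int → Int → Int → Int → Int
  | [], _, even, _odd, pos_even, pos_odd => if even == 1 then pos_even else pos_odd
  | v :: rest, i, even, odd, pos_even, pos_odd =>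
    if PySem.Int.mod v 2 == 0 then iqLoopA rest (i+1) (even+1) odd (i+1) pos_odd
    else iqLoopA rest (i+1) even (odd+1) pos_even (i+1)

def iq_test (nums : List Int) : Int := iqLoopA nums 0 0 0 0 0

-- ===== PORT B =====
-- B: count evens, then a targeted early-exit search (forward for the unique even,
-- backward from the end for the last odd). Alternative decomposition, same cost.
-- sum(1 for v in nums if v % 2 == 0)
def countEven : List Int → Int
  | [] => 0
  | v :: rest => (if PySem.Int.mod v 2 == 0 then 1 else 0) + countEven rest

-- forward scan: first index i with nums[i] even, returning i+1 (0 if none → final `return 0`)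
def findFirstEven : List Int → Int → Int
  | [], _ => 0
  | v :: rest, i => if PySem.Int.mod v 2 == 0 then i + 1 else findFirstEven rest (i+1)

-- backward scan over range(len-1, -1, -1); k is the number of indices still to examine,
-- so the current Python index is k-1.  nums[k-1] is in range, rendered with getD (exact here).
def revScanOdd (nums : List Int) : Nat → Int
  | 0 => 0
  | k+1 => if !(PySem.Int.mod (nums.getD k 0) 2 == 0) then (k : Int) + 1 else revScanOdd nums k

def iq_test_alt (nums : List Int) : Int :=
  if countEven nums == 1 then findFirstEven nums 0
  else revScanOdd nums nums.length

-- ===== PRECONDITION & SPEC =====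
def Spec_iq_test (nums : List Int) (out : Int) : Prop := out = iq_test_alt nums
instance (nums : List Int) (out : Int) : Decidable (Spec_iq_test nums out) := by unfold Spec_iq_test; infer_instance

-- ===== CLAIM (what is proved, stated in full; the proofs are below) =====
def Claim_equal_iq_test : Prop := ∀ (nums : List Int), Dom_iq_test nums → Spec_iq_test nums (iq_test nums)

-- ===== LEMMAS AND PROOFS =====
-- last position (1-based) of an element satisfying p, default d; characterises both loops.
def lastPos (p : Int → Bool) : List Int → Int → Int → Int
  | [], _, d => d
  | v :: rest, i, d => if p v then lastPos p rest (i+1) (i+1) else lastPos p rest (i+1) d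

lemma iqLoopA_eq :
    ∀ (l : List Int) (i even odd pe po : Int),
      iqLoopA l i even odd pe po =
        if even + (l.countP (fun v => PySem.Int.mod v 2 == 0) : Int) == 1 then
          lastPos (fun v => PySem.Int.mod v 2 == 0) l i pe
        else lastPos (fun v => !(PySem.Int.mod v 2 == 0)) l i po := by
  intro l
  induction l with
  | nil => intro i even odd pe po; simp [iqLoopA, lastPos]
  | cons v rest ih =>
    intro i even odd pe po
    by_cases h : (PySem.Int.mod v 2 == 0) = true
    · simp only [iqLoopA, h, if_pos, ih, List.countP_cons, lastPos, Bool.not_true,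
        Bool.false_eq_true, if_false]
      have hc : even + 1 + ((rest.countP (fun v => PySem.Int.mod v 2 == 0) : Nat) : Int)
          = even + (((rest.countP (fun v => PySem.Int.mod v 2 == 0) + 1 : Nat)) : Int) := by
        push_cast; ring
      rw [hc]
    · simp only [iqLoopA, h, Bool.false_eq_true, if_false, ih, List.countP_cons, lastPos,
        Bool.not_false, if_true]
      simp

lemma countEven_eq (l : List Int) :
    countEven l = (l.countP (fun v => PySem.Int.mod v 2 == 0) : Int) := by
  induction l with
  | nil => simp [countEven]
  | cons v rest ih =>
    rw [countEven, ih, List.countP_cons]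
    by_cases h : (PySem.Int.mod v 2 == 0) = true
    · rw [if_pos h, if_pos h]; push_cast; ring
    · rw [if_neg h, if_neg h]; push_cast; ring

lemma lastPos_of_countP_zero (p : Int → Bool) :
    ∀ (l : List Int) (i d : Int), l.countP p = 0 → lastPos p l i d = d := by
  intro l
  induction l with
  | nil => intro i d _; rfl
  | cons v rest ih =>
    intro i d h
    rw [List.countP_cons] at h
    by_cases hv : p v = true
    · exact absurd h (by rw [if_pos hv]; omega)
    · simp only [lastPos, hv, Bool.false_eq_true, if_false]
      exact ih _ _ (by rw [if_neg hv] at h; omega)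

lemma findFirstEven_eq_lastPos :
    ∀ (l : List Int) (i d : Int),
      l.countP (fun v => PySem.Int.mod v 2 == 0) = 1 →
      findFirstEven l i = lastPos (fun v => PySem.Int.mod v 2 == 0) l i d := by
  intro l
  induction l with
  | nil => intro i d h; simp at h
  | cons v rest ih =>
    intro i d h
    rw [List.countP_cons] at h
    by_cases hv : (PySem.Int.mod v 2 == 0) = true
    · have hr : rest.countP (fun v => PySem.Int.mod v 2 == 0) = 0 := by
        rw [if_pos hv] at h; omega
      simp only [findFirstEven, lastPos, hv, if_true]
      rw [lastPos_of_countP_zero _ _ _ _ hr]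
    · simp only [findFirstEven, lastPos, hv, Bool.false_eq_true, if_false]
      exact ih _ _ (by rw [if_neg hv] at h; omega)

lemma lastPos_append (p : Int → Bool) :
    ∀ (l : List Int) (v : Int) (i d : Int),
      lastPos p (l ++ [v]) i d =
        if p v then i + (l.length : Int) + 1 else lastPos p l i d := by
  intro l
  induction l with
  | nil =>
    intro v i d
    rw [List.nil_append, lastPos, lastPos]
    by_cases hv : p v = true
    · rw [if_pos hv, if_pos hv, lastPos]; simp
    · rw [if_neg hv, if_neg hv, lastPos]
  | cons w rest ih =>
    intro v i d
    rw [List.cons_append, lastPos, lastPos]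
    by_cases hw : p w = true
    · rw [if_pos hw, if_pos hw, ih]
      by_cases hv : p v = true
      · rw [if_pos hv, if_pos hv, List.length_cons]; push_cast; ring
      · rw [if_neg hv, if_neg hv]
    · rw [if_neg hw, if_neg hw, ih]
      by_cases hv : p v = true
      · rw [if_pos hv, if_pos hv, List.length_cons]; push_cast; ring
      · rw [if_neg hv, if_neg hv]

lemma revScanOdd_stable (nums l : List Int) (v : Int)
    (hnums : nums = l ++ [v]) :
    ∀ k, k ≤ l.length → revScanOdd nums k = revScanOdd l k := by
  intro k
  induction k with
  | zero => intro _; rfl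
  | succ n ihn =>
    intro hk
    have hg : nums.getD n 0 = l.getD n 0 := by
      rw [hnums]
      simp [List.getD, List.getElem?_append_left (by omega : n < l.length)]
    rw [revScanOdd, revScanOdd, hg, ihn (by omega)]

lemma revScanOdd_eq :
    ∀ (l : List Int),
      revScanOdd l l.length = lastPos (fun v => !(PySem.Int.mod v 2 == 0)) l 0 0 := by
  intro l
  induction l using List.reverseRecOn with
  | nil => rfl
  | append_singleton l v ih =>
    have hlen : (l ++ [v]).length = l.length + 1 := by simp
    rw [hlen, lastPos_append]
    have hget : (l ++ [v]).getD l.length 0 = v := by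
      simp [List.getD]
    rw [revScanOdd, hget]
    by_cases hv : (!(PySem.Int.mod v 2 == 0)) = true
    · rw [if_pos hv, if_pos hv]; ring
    · rw [if_neg hv, if_neg hv, revScanOdd_stable (l ++ [v]) l v rfl l.length (Nat.le_refl _), ih]

-- ===== VERDICT (by name: the statement is the Claim_ definition above) =====
theorem iq_test_spec : Claim_equal_iq_test := by
  intro nums _
  unfold Spec_iq_test iq_test iq_test_alt
  rw [iqLoopA_eq, countEven_eq]
  simp only [Int.zero_add]
  by_cases hc : ((nums.countP (fun v => PySem.Int.mod v 2 == 0) : Nat) : Int) == 1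
  · rw [if_pos hc, if_pos hc]
    have h1 : nums.countP (fun v => PySem.Int.mod v 2 == 0) = 1 := by
      have := of_decide_eq_true hc; omega
    exact (findFirstEven_eq_lastPos nums 0 0 h1).symm
  · rw [if_neg (by simpa using hc), if_neg (by simpa using hc)]
    exact (revScanOdd_eq nums).symm
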